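-- pv_equiv track=rewrite | github.com/sudeep2003/Cha-and-offset | app.py | format_feature_name
-- ===== SOURCE A (Python) =====
-- def format_feature_name(features):
--     """ Converts feature pairs into a formatted string. """
--     feature_list = []
--
--     for i in range(0, len(features), 2):
--         feature_key = features[i]
--         feature_value = features[i + 1] if i + 1 < len(features) else "NA"
--
--         if feature_key == "NA" and feature_value == "NA":
--             continue
--
--         formatted_feature = f"{feature_key}={feature_value}"
--         feature_list.append(formatted_feature)
--
--     feature_name = "/".join(feature_list).strip("/")
--     return feature_name if feature_name else "NA"
-- ===== SOURCE B (Python) =====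
-- def format_feature_name(features):
--     """ Converts feature pairs into a formatted string. """
--     out = ""
--     pending = None
--     for x in features:
--         if pending is None:
--             pending = x
--         else:
--             if not (pending == "NA" and x == "NA"):
--                 out += ("/" if out else "") + pending + "=" + x
--             pending = None
--     if pending is not None and pending != "NA":
--         out += ("/" if out else "") + pending + "=NA"
--     name = out.strip("/")
--     return name if name else "NA"
-- ===== Notes on version B (the rewrite author's own statement) =====
-- stated objective: alternative
-- what changed: Replaces A's staged pipeline (index-stride loop over range(0,len,2) building a list of parts, then '/'.join, then strip) with a single element-at-a-time state machine: one pass over the elements carrying (output-string-so-far, pending-key) state, inserting '/' separators as it appends, so no intermediate list and no join.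
import Mathlib
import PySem

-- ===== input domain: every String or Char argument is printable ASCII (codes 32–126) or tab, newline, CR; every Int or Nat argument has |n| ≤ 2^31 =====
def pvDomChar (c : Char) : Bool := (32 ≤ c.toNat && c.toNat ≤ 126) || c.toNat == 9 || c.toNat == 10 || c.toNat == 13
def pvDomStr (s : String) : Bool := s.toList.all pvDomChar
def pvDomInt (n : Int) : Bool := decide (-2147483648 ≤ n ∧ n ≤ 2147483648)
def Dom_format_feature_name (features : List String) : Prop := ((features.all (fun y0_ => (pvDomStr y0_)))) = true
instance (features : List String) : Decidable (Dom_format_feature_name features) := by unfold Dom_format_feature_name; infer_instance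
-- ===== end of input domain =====

-- B replaces A's staged pipeline (index-stride loop building a list of parts, then
-- "/".join, then strip) by a single element-at-a-time state machine: one fold over the
-- elements carrying (output string so far, pending key), appending separators as it goes
-- (objective: alternative decomposition, same cost).

-- ===== PORT A =====
def format_feature_name (features : List String) : String :=
  let n : Int := features.length
  let feature_list : List String :=
    (PySem.List.pyRange 0 n 2).foldl (fun acc i =>
      let feature_key := PySem.List.pyGetD features i ""   -- features[i]: i < n always, so in range
      let feature_value := if i + 1 < n then PySem.List.pyGetD features (i + 1) "" else "NA"
      if feature_key = "NA" ∧ feature_value = "NA" then acc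
      else acc ++ [feature_key ++ "=" ++ feature_value]) []
  let feature_name := PySem.Str.stripChars (PySem.Str.join "/" feature_list) "/"
  if feature_name = "" then "NA" else feature_name

-- ===== PORT B =====
-- one step of the loop body: state = (out, pending)
def altStep (st : String × Option String) (x : String) : String × Option String :=
  match st.2 with
  | none => (st.1, some x)
  | some pending =>
    if ¬ (pending = "NA" ∧ x = "NA") then
      (st.1 ++ (if st.1 ≠ "" then "/" else "") ++ pending ++ "=" ++ x, none)
    else (st.1, none)

-- the trailing 'if pending is not None and pending != "NA"' block
def altFinish (st : String × Option String) : String :=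
  match st.2 with
  | some pending =>
      if pending ≠ "NA" then st.1 ++ (if st.1 ≠ "" then "/" else "") ++ pending ++ "=NA"
      else st.1
  | none => st.1

def format_feature_name_alt (features : List String) : String :=
  let out := altFinish (features.foldl altStep ("", none))
  let name := PySem.Str.stripChars out "/"
  if name ≠ "" then name else "NA"

-- ===== PRECONDITION & SPEC =====
def Spec_format_feature_name (features : List String) (out : String) : Prop := out = format_feature_name_alt features
instance (features : List String) (out : String) : Decidable (Spec_format_feature_name features out) := by unfold Spec_format_feature_name; infer_instance

-- ===== CLAIM (what is proved, stated in full; the proofs are below) =====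
def Claim_equal_format_feature_name : Prop := ∀ (features : List String), Dom_format_feature_name features → Spec_format_feature_name features (format_feature_name features)

-- ===== LEMMAS AND PROOFS =====

-- the consecutive (key, value) pairs, "NA"-padded: the common abstraction of both programs
def pairsNA : List String → List (String × String)
  | [] => []
  | [x] => [(x, "NA")]
  | x :: y :: rest => (x, y) :: pairsNA rest

def parts (xs : List String) : List String :=
  ((pairsNA xs).filter (fun kv => decide (kv ≠ ("NA", "NA")))).map (fun kv => kv.1 ++ "=" ++ kv.2)

-- joining with "/" via a left fold that prepends a separator when the accumulator is nonempty
def joinAcc (s : String) (l : List String) : String :=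
  l.foldl (fun o p => o ++ (if o ≠ "" then "/" else "") ++ p) s

-- the pair A's loop reads at index i
def pairAt (xs : List String) (i : Int) : String × String :=
  (PySem.List.pyGetD xs i "",
   if i + 1 < (xs.length : Int) then PySem.List.pyGetD xs (i + 1) "" else "NA")

lemma pyGetD_cons_succ (a : String) (l : List String) (k : Nat) (d : String) :
    PySem.List.pyGetD (a :: l) ((k : Int) + 1) d = PySem.List.pyGetD l (k : Int) d := by
  have h1 : ((k : Int) + 1) = ((k + 1 : Nat) : Int) := by push_cast; ring
  rw [h1, PySem.List.pyGetD_natCast, PySem.List.pyGetD_natCast, List.getD_cons_succ]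

lemma pairAt_cons_cons (x y : String) (rest : List String) (k : Nat) :
    pairAt (x :: y :: rest) (2 * (k : Int) + 2) = pairAt rest (2 * (k : Int)) := by
  have g1 : PySem.List.pyGetD (x :: y :: rest) (2 * (k : Int) + 2) ""
      = PySem.List.pyGetD rest (2 * (k : Int)) "" := by
    have e1 : (2 * (k : Int) + 2) = ((2 * k + 1 : Nat) : Int) + 1 := by push_cast; ring
    rw [e1, pyGetD_cons_succ]
    have e2 : ((2 * k + 1 : Nat) : Int) = ((2 * k : Nat) : Int) + 1 := by push_cast; ring
    rw [e2, pyGetD_cons_succ]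
    norm_cast
  have g2 : PySem.List.pyGetD (x :: y :: rest) (2 * (k : Int) + 2 + 1) ""
      = PySem.List.pyGetD rest (2 * (k : Int) + 1) "" := by
    have e1 : (2 * (k : Int) + 2 + 1) = ((2 * k + 2 : Nat) : Int) + 1 := by push_cast; ring
    rw [e1, pyGetD_cons_succ]
    have e2 : ((2 * k + 2 : Nat) : Int) = ((2 * k + 1 : Nat) : Int) + 1 := by push_cast; ring
    rw [e2, pyGetD_cons_succ]
    norm_cast
  unfold pairAt
  simp only [Prod.mk.injEq]
  refine ⟨g1, ?_⟩
  have hiff : (2 * (k : Int) + 2 + 1 < ((x :: y :: rest).length : Int))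
      ↔ (2 * (k : Int) + 1 < (rest.length : Int)) := by
    simp only [List.length_cons]
    push_cast
    omega
  rw [if_congr hiff g2 rfl]

lemma aux_pairs (xs : List String) :
    (List.range ((xs.length + 1) / 2)).map (fun (k : Nat) => pairAt xs (2 * (k : Int))) = pairsNA xs := by
  induction xs using pairsNA.induct with
  | case1 => simp [pairsNA]
  | case2 x =>
    have h1 : (([x] : List String).length + 1) / 2 = 1 := by simp
    rw [h1]
    have hx : PySem.List.pyGetD [x] ((0 : Nat) : Int) "" = x := by
      rw [PySem.List.pyGetD_natCast]; rfl
    simp [pairAt, pairsNA]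
  | case3 x y rest ih =>
    have hm : ((x :: y :: rest).length + 1) / 2 = ((rest.length + 1) / 2) + 1 := by
      simp only [List.length_cons]; omega
    rw [hm, List.range_succ_eq_map, List.map_cons, List.map_map]
    have hx : PySem.List.pyGetD (x :: y :: rest) ((0 : Nat) : Int) "" = x := by
      rw [PySem.List.pyGetD_natCast]; rfl
    have hy : PySem.List.pyGetD (x :: y :: rest) (((0 : Nat) : Int) + 1) "" = y := by
      rw [pyGetD_cons_succ, PySem.List.pyGetD_natCast]; rfl
    have hh : pairAt (x :: y :: rest) (2 * ((0 : Nat) : Int)) = (x, y) := by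
      unfold pairAt
      have h2 : (2 * ((0 : Nat) : Int)) = ((0 : Nat) : Int) := by norm_num
      rw [h2, hx]
      have hcond : ((0 : Nat) : Int) + 1 < (((x :: y :: rest).length : Nat) : Int) := by
        simp only [List.length_cons]; push_cast; omega
      rw [if_pos hcond, hy]
    have ht : ∀ k ∈ List.range ((rest.length + 1) / 2),
        ((fun (k : Nat) => pairAt (x :: y :: rest) (2 * (k : Int))) ∘ Nat.succ) k
          = pairAt rest (2 * (k : Int)) := by
      intro k _
      show pairAt (x :: y :: rest) (2 * ((k + 1 : Nat) : Int)) = pairAt rest (2 * (k : Int))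
      have e : (2 * ((k + 1 : Nat) : Int)) = 2 * (k : Int) + 2 := by push_cast; ring
      rw [e, pairAt_cons_cons]
    rw [List.map_congr_left ht, ih, hh]
    simp [pairsNA]

lemma range2_map_pairAt (xs : List String) :
    (PySem.List.pyRange 0 (xs.length : Int) 2).map (pairAt xs) = pairsNA xs := by
  rw [PySem.List.pyRange_of_pos 0 (xs.length : Int) (by norm_num), List.map_map]
  have hcount : (if (0 : Int) < (xs.length : Int)
      then (((xs.length : Int) - 0 + 2 - 1) / 2).toNat else 0) = (xs.length + 1) / 2 := by
    split_ifs with h <;> omega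
  rw [hcount, ← aux_pairs xs]
  refine List.map_congr_left ?_
  intro k _
  show pairAt xs (0 + 2 * (k : Int)) = pairAt xs (2 * (k : Int))
  rw [zero_add]

-- A's loop computes exactly 'parts'
lemma lists_eq (xs : List String) :
    (PySem.List.pyRange 0 (xs.length : Int) 2).foldl (fun acc i =>
      let feature_key := PySem.List.pyGetD xs i ""
      let feature_value := if i + 1 < (xs.length : Int) then PySem.List.pyGetD xs (i + 1) "" else "NA"
      if feature_key = "NA" ∧ feature_value = "NA" then acc
      else acc ++ [feature_key ++ "=" ++ feature_value]) []
    = parts xs := by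
  have hstep : ∀ (acc : List String) (i : Int),
      (let feature_key := PySem.List.pyGetD xs i ""
       let feature_value := if i + 1 < (xs.length : Int) then PySem.List.pyGetD xs (i + 1) "" else "NA"
       if feature_key = "NA" ∧ feature_value = "NA" then acc
       else acc ++ [feature_key ++ "=" ++ feature_value])
      = if (pairAt xs i) ≠ ("NA", "NA") then acc ++ [(pairAt xs i).1 ++ "=" ++ (pairAt xs i).2] else acc := by
    intro acc i
    simp only [pairAt, ne_eq, Prod.mk.injEq]
    by_cases h : PySem.List.pyGetD xs i "" = "NA" ∧
        (if i + 1 < (xs.length : Int) then PySem.List.pyGetD xs (i + 1) "" else "NA") = "NA"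
    · rw [if_pos h, if_neg (not_not_intro h)]
    · rw [if_neg h, if_pos h]
  simp only [hstep]
  rw [PySem.List.foldl_append_ite (fun i => pairAt xs i ≠ ("NA", "NA"))
      (fun i => (pairAt xs i).1 ++ "=" ++ (pairAt xs i).2)]
  unfold parts
  rw [← range2_map_pairAt, List.filter_map, List.map_map]
  simp [Function.comp_def]

-- ===== join lemmas =====
lemma join_singleton' (a : String) : PySem.Str.join "/" [a] = a := by
  apply String.toList_injective; simp [PySem.Str.join, PySem.Chars.join_singleton]

lemma join_cons_cons' (a b : String) (l : List String) :
    PySem.Str.join "/" (a :: b :: l) = a ++ "/" ++ PySem.Str.join "/" (b :: l) := by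
  apply String.toList_injective
  simp [PySem.Str.join, PySem.Chars.join_cons_cons]

lemma joinAcc_cons (s p : String) (l : List String) :
    joinAcc s (p :: l) = joinAcc (s ++ (if s ≠ "" then "/" else "") ++ p) l := rfl

lemma joinAcc_ne (l : List String) : ∀ s : String, s ≠ "" →
    joinAcc s l = if l = [] then s else s ++ "/" ++ PySem.Str.join "/" l := by
  induction l with
  | nil => intro s _; simp [joinAcc]
  | cons p l ih =>
    intro s hs
    rw [joinAcc_cons, if_pos hs]
    have hne : s ++ "/" ++ p ≠ "" := by
      intro h
      have := congrArg String.toList h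
      simp at this
    rw [ih _ hne]
    cases l with
    | nil => simp [join_singleton']
    | cons q l' =>
      simp only [List.cons_ne_nil, reduceIte]
      rw [join_cons_cons']
      simp [String.append_assoc]

lemma joinAcc_eq_join (l : List String) (h : ∀ p ∈ l, p ≠ "") :
    joinAcc "" l = PySem.Str.join "/" l := by
  cases l with
  | nil =>
    apply String.toList_injective
    simp [joinAcc, PySem.Str.join, PySem.Chars.join_nil]
  | cons p l' =>
    have hp : p ≠ "" := h p (by simp)
    rw [joinAcc_cons]
    simp only [ne_eq, not_true_eq_false, reduceIte]
    have hstart : ("" : String) ++ "" ++ p = p := by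
      apply String.toList_injective; simp
    rw [hstart, joinAcc_ne l' p hp]
    cases l' with
    | nil => simp [join_singleton']
    | cons q l'' => simp [join_cons_cons']

lemma parts_ne_empty (xs : List String) : ∀ p ∈ parts xs, p ≠ "" := by
  intro p hp
  unfold parts at hp
  simp only [List.mem_map, List.mem_filter] at hp
  obtain ⟨kv, _, hkv⟩ := hp
  intro h
  rw [← hkv] at h
  have := congrArg String.toList h
  simp at this

-- B's fold computes joinAcc over 'parts'
lemma alt_fold_eq (xs : List String) : ∀ s : String,
    altFinish (xs.foldl altStep (s, none)) = joinAcc s (parts xs) := by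
  induction xs using pairsNA.induct with
  | case1 => intro s; simp [altFinish, parts, pairsNA, joinAcc]
  | case2 x =>
    intro s
    by_cases hx : x = "NA"
    · subst hx; simp [altStep, altFinish, parts, pairsNA, joinAcc]
    · have hNA : ("=" : String) ++ "NA" = "=NA" := by decide
      simp [altStep, altFinish, parts, pairsNA, hx, joinAcc, String.append_assoc, hNA]
  | case3 x y rest ih =>
    intro s
    simp only [List.foldl_cons]
    have h1 : altStep (s, none) x = (s, some x) := rfl
    rw [h1]
    by_cases hkv : x = "NA" ∧ y = "NA"
    · have h2 : altStep (s, some x) y = (s, none) := by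
        simp [altStep, hkv]
      rw [h2, ih s]
      have hp : parts (x :: y :: rest) = parts rest := by
        unfold parts
        simp [pairsNA, hkv.1, hkv.2]
      rw [hp]
    · have h2 : altStep (s, some x) y
          = (s ++ (if s ≠ "" then "/" else "") ++ x ++ "=" ++ y, none) := by
        simp [altStep, hkv]
      rw [h2, ih]
      have hp : parts (x :: y :: rest) = (x ++ "=" ++ y) :: parts rest := by
        unfold parts
        have : (x, y) ≠ ("NA", "NA") := by
          simp only [ne_eq, Prod.mk.injEq]; exact hkv
        simp [pairsNA, this]
      rw [hp, joinAcc_cons]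
      simp [String.append_assoc]

-- ===== VERDICT (by name: the statement is the Claim_ definition above) =====
theorem format_feature_name_spec : Claim_equal_format_feature_name := by
  intro features _
  unfold Spec_format_feature_name format_feature_name format_feature_name_alt
  simp only [lists_eq, alt_fold_eq, joinAcc_eq_join (parts features) (parts_ne_empty features)]
  by_cases h : PySem.Str.stripChars (PySem.Str.join "/" (parts features)) "/" = "" <;> simp [h]
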